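-- pv_equiv track=rewrite | github.com/arnabm-94/Mango_Tree_problem- | mango_tree_problem.py | mango_trees
-- ===== SOURCE A (Python) =====
-- def mango_trees(grid):
--     N = len(grid)
--
--     # Create prefix sum matrix
--     prefix_sum = [[0] * (N + 1) for _ in range(N + 1)]
--
--     for i in range(1, N + 1):
--         for j in range(1, N + 1):
--             prefix_sum[i][j] = grid[i-1][j-1] + prefix_sum[i-1][j] + prefix_sum[i][j-1] - prefix_sum[i-1][j-1]
--
--     max_min_trees = 0
--
--     # Try all possible positions for the horizontal and vertical lines
--     for i in range(1, N):
--         for j in range(1, N):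
--             # Calculate the number of trees in each of the four sections
--             top_left = prefix_sum[i][j]
--             top_right = prefix_sum[i][N] - prefix_sum[i][j]
--             bottom_left = prefix_sum[N][j] - prefix_sum[i][j]
--             bottom_right = prefix_sum[N][N] - prefix_sum[i][N] - prefix_sum[N][j] + prefix_sum[i][j]
--
--             # Find the minimum number of trees in any section
--             min_trees = min(top_left, top_right, bottom_left, bottom_right)
--
--             # Update the maximum of the minimum number of trees found
--             max_min_trees = max(max_min_trees, min_trees)
--
--     return max_min_trees
-- ===== SOURCE B (Python) =====
-- def mango_trees(grid):
--     N = len(grid)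
--     # column sums of the whole grid (first N columns of each row)
--     col_tot = [0] * N
--     for row in grid:
--         col_tot = [col_tot[c] + row[c] for c in range(N)]
--     # horizontal prefix sums of the total column sums: tot_pref[j] = sum(col_tot[:j])
--     tot_pref = [0]
--     for s in col_tot:
--         tot_pref.append(tot_pref[-1] + s)
--     total = tot_pref[N]
--     best = 0
--     top_col = [0] * N  # column sums of the rows above the horizontal cut
--     for i in range(1, N):
--         row = grid[i - 1]
--         top_col = [top_col[c] + row[c] for c in range(N)]
--         top_total = sum(top_col)
--         run = 0  # running horizontal prefix of top_col = top-left quadrant sum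
--         for j in range(1, N):
--             run += top_col[j - 1]
--             bl = tot_pref[j] - run
--             best = max(best, min(run, top_total - run, bl,
--                                  total - top_total - bl))
--     return best
-- ===== Notes on version B (the rewrite author's own statement) =====
-- stated objective: alternative
-- what changed: B drops the (N+1)x(N+1) prefix-sum matrix: it keeps 1D running column sums for the rows above the cut plus one horizontal prefix array of the full-grid column sums, deriving all four quadrant sums from O(N) state.
import Mathlib
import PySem

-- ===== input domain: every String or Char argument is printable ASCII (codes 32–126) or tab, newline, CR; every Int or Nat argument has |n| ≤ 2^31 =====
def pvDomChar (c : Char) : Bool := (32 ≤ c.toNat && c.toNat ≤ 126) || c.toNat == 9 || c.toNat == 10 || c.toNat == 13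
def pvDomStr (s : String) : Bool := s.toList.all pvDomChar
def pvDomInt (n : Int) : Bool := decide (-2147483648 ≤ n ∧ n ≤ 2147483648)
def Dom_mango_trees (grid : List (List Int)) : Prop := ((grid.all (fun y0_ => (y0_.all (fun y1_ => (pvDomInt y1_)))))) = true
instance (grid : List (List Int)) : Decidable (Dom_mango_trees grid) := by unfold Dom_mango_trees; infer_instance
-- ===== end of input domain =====

-- B replaces A's (N+1)×(N+1) prefix-sum matrix by 1D running column sums plus one
-- horizontal prefix array (O(N) extra state instead of O(N^2)); same return value.

-- ===== PORT A =====
-- grid[r][c] for Nat indices; getD 0 is exact under Pre_ (indices are always in range there).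
def pvAGet (grid : List (List Int)) (r c : Nat) : Int := (grid.getD r []).getD c 0

-- inner loop 'for j in range(1, N+1)': builds row i of prefix_sum from row i-1
-- (k = j-1; cur holds entries 0..k of row i, prev is row i-1)
def pvARow (grid : List (List Int)) (prev : List Int) (i N : Nat) : List Int :=
  (List.range N).foldl
    (fun cur k =>
      cur ++ [pvAGet grid i k + prev.getD (k+1) 0 + cur.getD k 0 - prev.getD k 0])
    [0]

-- outer loop 'for i in range(1, N+1)': rows of prefix_sum filled in order
-- (row i of the Python matrix only ever reads row i-1, the last row filled)
def pvAMatrix (grid : List (List Int)) (N : Nat) : List (List Int) :=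
  (List.range N).foldl (fun ps i => ps ++ [pvARow grid (ps.getD i []) i N])
    [List.replicate (N+1) 0]

def mango_trees (grid : List (List Int)) : Int :=
  let N := grid.length
  let ps := pvAMatrix grid N
  -- 'for i in range(1, N)' / 'for j in range(1, N)' with i = a+1, j = b+1
  (List.range (N-1)).foldl (fun best a =>
    (List.range (N-1)).foldl (fun best b =>
      let tl := (ps.getD (a+1) []).getD (b+1) 0
      let tr := (ps.getD (a+1) []).getD N 0 - tl
      let bl := (ps.getD N []).getD (b+1) 0 - tl
      let br := (ps.getD N []).getD N 0 - (ps.getD (a+1) []).getD N 0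
                  - (ps.getD N []).getD (b+1) 0 + tl
      max best (min (min (min tl tr) bl) br)) best) 0

-- ===== PORT B =====
-- '[t[c] + row[c] for c in range(N)]'; getD 0 is exact under Pre_
def pvBStep (t row : List Int) (N : Nat) : List Int :=
  (List.range N).map (fun c => t.getD c 0 + row.getD c 0)

-- body of 'for j in range(1, N)' with j = b+1; rb = (run, best)
def pvBInnerStep (tc totPref : List Int) (total tt : Int) (rb : Int × Int) (b : Nat) : Int × Int :=
  let run := rb.1 + tc.getD b 0
  let bl := totPref.getD (b+1) 0 - run
  (run, max rb.2 (min (min (min run (tt - run)) bl) (total - tt - bl)))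

-- body of 'for i in range(1, N)' with i = a+1; st = (top_col, best)
def pvBOuterStep (grid : List (List Int)) (totPref : List Int) (total : Int) (N : Nat)
    (st : List Int × Int) (a : Nat) : List Int × Int :=
  let row := grid.getD a []
  let tc := pvBStep st.1 row N
  let inner := (List.range (N-1)).foldl (pvBInnerStep tc totPref total tc.sum) (0, st.2)
  (tc, inner.2)

def mango_trees_alt (grid : List (List Int)) : Int :=
  let N := grid.length
  let colTot := grid.foldl (fun t row => pvBStep t row N) (List.replicate N 0)
  -- 'tot_pref.append(tot_pref[-1] + s)'; tp is never empty, so tp[-1] = tp[tp.length-1]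
  let totPref := colTot.foldl (fun tp s => tp ++ [tp.getD (tp.length - 1) 0 + s]) [0]
  ((List.range (N-1)).foldl (pvBOuterStep grid totPref (totPref.getD N 0) N)
      (List.replicate N 0, 0)).2

-- ===== PRECONDITION & SPEC =====
-- Pre_ excludes exactly the ragged grids on which A raises IndexError
-- (some row shorter than the number of rows N; A reads grid[i][j] for all i, j < N).
def Pre_mango_trees (grid : List (List Int)) : Prop :=
  ∀ row ∈ grid, grid.length ≤ row.length
instance (grid : List (List Int)) : Decidable (Pre_mango_trees grid) := by
  unfold Pre_mango_trees; infer_instance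

def pvWitness_mango_trees : List (List Int) := [[1, 2], [3, 4]]

def Spec_mango_trees (grid : List (List Int)) (out : Int) : Prop := out = mango_trees_alt grid
instance (grid : List (List Int)) (out : Int) : Decidable (Spec_mango_trees grid out) := by
  unfold Spec_mango_trees; infer_instance

-- ===== CLAIM (what is proved, stated in full; the proofs are below) =====
def Claim_equal_mango_trees : Prop := ∀ (grid : List (List Int)), Dom_mango_trees grid → Pre_mango_trees grid → Spec_mango_trees grid (mango_trees grid)

-- ===== LEMMAS AND PROOFS =====

-- column sum of the first i rows at column c, and the quadrant sum
-- S i j = sum over rows < i, columns < j (column-first, matching B's orientation)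
def pvColS (grid : List (List Int)) (i c : Nat) : Int :=
  ∑ r ∈ Finset.range i, pvAGet grid r c
def pvS (grid : List (List Int)) (i j : Nat) : Int :=
  ∑ c ∈ Finset.range j, pvColS grid i c

-- the common mathematical form both programs compute
def pvE (grid : List (List Int)) (N i j : Nat) : Int :=
  let tl := pvS grid i j
  min (min (min tl (pvS grid i N - tl)) (pvS grid N j - tl))
      (pvS grid N N - pvS grid i N - pvS grid N j + tl)
def pvBest (grid : List (List Int)) (N : Nat) : Int :=
  (List.range (N-1)).foldl (fun best a =>
    (List.range (N-1)).foldl (fun best b => max best (pvE grid N (a+1) (b+1))) best) 0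

lemma pvColS_succ (grid : List (List Int)) (i c : Nat) :
    pvColS grid (i+1) c = pvColS grid i c + pvAGet grid i c := Finset.sum_range_succ _ _

lemma pvS_succ (grid : List (List Int)) (i j : Nat) :
    pvS grid i (j+1) = pvS grid i j + pvColS grid i j := Finset.sum_range_succ _ _

lemma sum_map_range (f : Nat → Int) (n : Nat) :
    ((List.range n).map f).sum = ∑ i ∈ Finset.range n, f i := rfl

-- ---- A side: the prefix-sum matrix holds exactly the quadrant sums pvS ----

lemma pvARow_aux (grid : List (List Int)) (prev : List Int) (i N : Nat)
    (hp : ∀ j, j ≤ N → prev.getD j 0 = pvS grid i j) :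
    ∀ n, n ≤ N →
      (List.range n).foldl
        (fun cur k =>
          cur ++ [pvAGet grid i k + prev.getD (k+1) 0 + cur.getD k 0 - prev.getD k 0])
        [0] = (List.range (n+1)).map (fun j => pvS grid (i+1) j) := by
  intro n hn
  induction n with
  | zero => simp [pvS]
  | succ m ih =>
    rw [List.range_succ, List.foldl_append, ih (by omega)]
    rw [List.foldl_cons, List.foldl_nil]
    rw [PySem.List.getD_map_range _ _ _ _ (by omega)]
    rw [hp (m+1) (by omega), hp m (by omega)]
    conv_rhs => rw [List.range_succ, List.map_append]
    congr 1
    simp only [List.map_cons, List.map_nil]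
    congr 1
    rw [pvS_succ, pvS_succ, pvColS_succ]
    ring

lemma pvARow_eq (grid : List (List Int)) (prev : List Int) (i N : Nat)
    (hp : ∀ j, j ≤ N → prev.getD j 0 = pvS grid i j) :
    pvARow grid prev i N = (List.range (N+1)).map (fun j => pvS grid (i+1) j) :=
  pvARow_aux grid prev i N hp N le_rfl

lemma pvAMatrix_aux (grid : List (List Int)) (N : Nat) :
    ∀ n, n ≤ N →
      (List.range n).foldl (fun ps i => ps ++ [pvARow grid (ps.getD i []) i N])
        [List.replicate (N+1) 0] =
      (List.range (n+1)).map (fun i => (List.range (N+1)).map (fun j => pvS grid i j)) := by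
  intro n hn
  induction n with
  | zero =>
    simp [pvS, pvColS]
  | succ m ih =>
    rw [List.range_succ, List.foldl_append, ih (by omega), List.foldl_cons, List.foldl_nil]
    rw [PySem.List.getD_map_range _ _ _ _ (by omega)]
    conv_rhs => rw [List.range_succ (n := m+1), List.map_append]
    congr 1
    simp only [List.map_cons, List.map_nil]
    congr 1
    exact pvARow_eq grid _ m N (fun j hj => PySem.List.getD_map_range _ _ _ _ (by omega))

lemma pvAMatrix_eq (grid : List (List Int)) (N : Nat) :
    pvAMatrix grid N =
      (List.range (N+1)).map (fun i => (List.range (N+1)).map (fun j => pvS grid i j)) :=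
  pvAMatrix_aux grid N N le_rfl

lemma ps_read (grid : List (List Int)) (N i j : Nat) (hi : i ≤ N) (hj : j ≤ N) :
    ((pvAMatrix grid N).getD i []).getD j 0 = pvS grid i j := by
  rw [pvAMatrix_eq, PySem.List.getD_map_range _ _ _ _ (by omega),
      PySem.List.getD_map_range _ _ _ _ (by omega)]

lemma mango_trees_eq (grid : List (List Int)) :
    mango_trees grid = pvBest grid grid.length := by
  simp only [mango_trees, pvBest]
  apply PySem.List.foldl_congr_mem
  intro acc a ha
  apply PySem.List.foldl_congr_mem
  intro acc2 b hb
  rw [List.mem_range] at ha hb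
  rw [ps_read grid _ _ _ (by omega) (by omega), ps_read grid _ _ _ (by omega) (by omega),
      ps_read grid _ _ _ (by omega) (by omega), ps_read grid _ _ _ (by omega) (by omega)]
  simp only [pvE]

-- ---- B side: the 1D accumulators hold column sums / their horizontal prefixes ----

lemma pvBStep_map (t row : List Int) (N : Nat) (f : Nat → Int) (ht : t = (List.range N).map f) :
    pvBStep t row N = (List.range N).map (fun c => f c + row.getD c 0) := by
  subst ht
  unfold pvBStep
  apply List.map_congr_left
  intro c hc
  rw [List.mem_range] at hc
  rw [PySem.List.getD_map_range _ _ _ _ hc]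

lemma colTot_eq (N : Nat) (rows : List (List Int)) (f : Nat → Int) :
    rows.foldl (fun t row => pvBStep t row N) ((List.range N).map f) =
      (List.range N).map (fun c => f c + ∑ r ∈ Finset.range rows.length, (rows.getD r []).getD c 0) := by
  induction rows generalizing f with
  | nil => simp
  | cons row rows ih =>
    rw [List.foldl_cons, pvBStep_map _ _ _ f rfl, ih]
    apply List.map_congr_left
    intro c _
    simp only [List.length_cons]
    rw [Finset.sum_range_succ']
    simp only [List.getD_cons_succ, List.getD_cons_zero]
    ring

lemma totPref_eq (xs : List Int) :
    xs.foldl (fun tp s => tp ++ [tp.getD (tp.length - 1) 0 + s]) [0] =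
      (List.range (xs.length + 1)).map (fun j => (xs.take j).sum) := by
  induction xs using List.reverseRecOn with
  | nil => simp
  | append_singleton xs x ih =>
    rw [List.foldl_append, ih, List.foldl_cons, List.foldl_nil]
    have hlen : ((List.range (xs.length + 1)).map (fun j => (xs.take j).sum)).length = xs.length + 1 := by simp
    rw [hlen]
    simp only [Nat.add_sub_cancel]
    rw [PySem.List.getD_map_range _ _ _ _ (by omega)]
    conv_rhs => rw [List.length_append, List.length_singleton,
      List.range_succ (n := xs.length + 1), List.map_append]
    congr 1
    · apply List.map_congr_left
      intro j hj
      rw [List.mem_range] at hj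
      rw [List.take_append_of_le_length (by omega)]
    · simp [List.take_length]

lemma innerFold (h : Nat → Int) (m : Int → Nat → Int) (n : Nat) (r0 b0 : Int) :
    ((List.range n).foldl
        (fun (rb : Int × Int) b => (rb.1 + h b, max rb.2 (m (rb.1 + h b) b))) (r0, b0)) =
      (r0 + ∑ b ∈ Finset.range n, h b,
       (List.range n).foldl
         (fun best b => max best (m (r0 + ∑ c ∈ Finset.range (b+1), h c) b)) b0) := by
  induction n with
  | zero => simp
  | succ k ih =>
    rw [List.range_succ, List.foldl_append, List.foldl_append, ih,
        List.foldl_cons, List.foldl_nil, List.foldl_cons, List.foldl_nil]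
    rw [Finset.sum_range_succ, ← add_assoc]

lemma replicate_colS (grid : List (List Int)) (N : Nat) :
    List.replicate N (0:Int) = (List.range N).map (fun c => pvColS grid 0 c) := by
  simp [pvColS]

lemma colTot_colS (grid : List (List Int)) :
    grid.foldl (fun t row => pvBStep t row grid.length) (List.replicate grid.length 0) =
      (List.range grid.length).map (fun c => pvColS grid grid.length c) := by
  rw [replicate_colS grid, colTot_eq]
  apply List.map_congr_left
  intro c _
  simp [pvColS, pvAGet]

lemma totPref_colS (grid : List (List Int)) (N : Nat) :
    ((List.range N).map (fun c => pvColS grid N c)).foldl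
        (fun tp s => tp ++ [tp.getD (tp.length - 1) 0 + s]) [0] =
      (List.range (N+1)).map (fun j => pvS grid N j) := by
  rw [totPref_eq]
  simp only [List.length_map, List.length_range]
  apply List.map_congr_left
  intro j hj
  rw [List.mem_range] at hj
  rw [← List.map_take, List.take_range, Nat.min_eq_left (by omega), sum_map_range]
  rfl

lemma tc_colS (grid : List (List Int)) (n : Nat) :
    pvBStep ((List.range grid.length).map (fun c => pvColS grid n c)) (grid.getD n []) grid.length =
      (List.range grid.length).map (fun c => pvColS grid (n+1) c) := by
  rw [pvBStep_map _ _ _ _ rfl]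
  apply List.map_congr_left
  intro c _
  rw [pvColS_succ]
  rfl

lemma innerAll (grid : List (List Int)) (i : Nat) (B : Int) :
    ((List.range (grid.length - 1)).foldl
        (pvBInnerStep ((List.range grid.length).map (fun c => pvColS grid i c))
          ((List.range (grid.length + 1)).map (fun j => pvS grid grid.length j))
          (pvS grid grid.length grid.length)
          (((List.range grid.length).map (fun c => pvColS grid i c)).sum))
        (0, B)).2 =
      (List.range (grid.length - 1)).foldl
        (fun best b => max best (pvE grid grid.length i (b+1))) B := by
  have htt : (((List.range grid.length).map (fun c => pvColS grid i c)).sum) = pvS grid i grid.length := by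
    rw [sum_map_range]; rfl
  rw [htt]
  have hfun : pvBInnerStep ((List.range grid.length).map (fun c => pvColS grid i c))
      ((List.range (grid.length + 1)).map (fun j => pvS grid grid.length j))
      (pvS grid grid.length grid.length) (pvS grid i grid.length) =
      fun (rb : Int × Int) b =>
        (rb.1 + ((List.range grid.length).map (fun c => pvColS grid i c)).getD b 0,
         max rb.2
           ((fun run b => min
              (min (min run (pvS grid i grid.length - run))
                (((List.range (grid.length + 1)).map (fun j => pvS grid grid.length j)).getD (b+1) 0 - run))
              (pvS grid grid.length grid.length - pvS grid i grid.length -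
                (((List.range (grid.length + 1)).map (fun j => pvS grid grid.length j)).getD (b+1) 0 - run)))
             (rb.1 + ((List.range grid.length).map (fun c => pvColS grid i c)).getD b 0) b)) := by
    funext rb b
    simp [pvBInnerStep]
  rw [hfun, innerFold
    (fun b => ((List.range grid.length).map (fun c => pvColS grid i c)).getD b 0)
    (fun run b => min
      (min (min run (pvS grid i grid.length - run))
        (((List.range (grid.length + 1)).map (fun j => pvS grid grid.length j)).getD (b+1) 0 - run))
      (pvS grid grid.length grid.length - pvS grid i grid.length -
        (((List.range (grid.length + 1)).map (fun j => pvS grid grid.length j)).getD (b+1) 0 - run)))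
    (grid.length - 1) 0 B]
  apply PySem.List.foldl_congr_mem
  intro acc b hb
  rw [List.mem_range] at hb
  have hsum : (0 + ∑ c ∈ Finset.range (b+1),
      ((List.range grid.length).map (fun c => pvColS grid i c)).getD c 0) = pvS grid i (b+1) := by
    rw [zero_add]
    have hmem : ∀ c ∈ Finset.range (b+1),
        ((List.range grid.length).map (fun c => pvColS grid i c)).getD c 0 = pvColS grid i c := by
      intro c hc
      rw [Finset.mem_range] at hc
      exact PySem.List.getD_map_range _ _ _ _ (by omega)
    rw [Finset.sum_congr rfl hmem]
    rfl
  rw [hsum, PySem.List.getD_map_range _ _ _ _ (by omega)]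
  simp only [pvE]
  have harith : pvS grid grid.length grid.length - pvS grid i grid.length -
      (pvS grid grid.length (b+1) - pvS grid i (b+1)) =
      pvS grid grid.length grid.length - pvS grid i grid.length -
        pvS grid grid.length (b+1) + pvS grid i (b+1) := by ring
  rw [harith]

lemma outerFold (grid : List (List Int)) (b0 : Int) (n : Nat) :
    ((List.range n).foldl
        (pvBOuterStep grid ((List.range (grid.length+1)).map (fun j => pvS grid grid.length j))
          (pvS grid grid.length grid.length) grid.length)
        ((List.range grid.length).map (fun c => pvColS grid 0 c), b0)) =
      ((List.range grid.length).map (fun c => pvColS grid n c),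
       (List.range n).foldl (fun best a =>
         (List.range (grid.length - 1)).foldl
           (fun best b => max best (pvE grid grid.length (a+1) (b+1))) best) b0) := by
  induction n with
  | zero => simp
  | succ k ih =>
    rw [show List.range (k+1) = List.range k ++ [k] from List.range_succ,
        List.foldl_append, List.foldl_append, ih,
        List.foldl_cons, List.foldl_nil, List.foldl_cons, List.foldl_nil]
    simp only [pvBOuterStep, tc_colS]
    congr 1
    exact innerAll grid (k+1) _

lemma mango_trees_alt_eq (grid : List (List Int)) :
    mango_trees_alt grid = pvBest grid grid.length := by
  simp only [mango_trees_alt]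
  rw [colTot_colS, totPref_colS,
      PySem.List.getD_map_range _ _ _ _ (show grid.length < grid.length + 1 by omega),
      replicate_colS grid, outerFold]
  rfl

-- ===== VERDICT (by name: the statement is the Claim_ definition above) =====
theorem mango_trees_spec : Claim_equal_mango_trees := by
  intro grid _ _
  show _ = _
  rw [mango_trees_eq, mango_trees_alt_eq]
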